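-- pv_equiv track=rewrite | github.com/Eviltsundera/mlsd_1 | src/data/merge_datasets.py | count_examples_by_source
-- ===== SOURCE A (Python) =====
-- def count_examples_by_source(merged_train, merged_val, merged_test):
--     """Подсчет количества примеров по источникам."""
--     sources = {}
--
--     for source in ["ag_news", "bbc_news", "20newsgroups"]:
--         train_count = len([ex for ex in merged_train if ex["source"] == source]) if merged_train else 0
--         val_count = len([ex for ex in merged_val if ex["source"] == source]) if merged_val else 0
--         test_count = len([ex for ex in merged_test if ex["source"] == source]) if merged_test else 0
--         sources[source] = train_count + val_count + test_count
--
--     return sources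
-- ===== SOURCE B (Python) =====
-- from collections import Counter
--
-- def count_examples_by_source(merged_train, merged_val, merged_test):
--     """Подсчет количества примеров по источникам (one pass + fixed-key extraction)."""
--     counts = Counter()
--     for split in (merged_train, merged_val, merged_test):
--         for ex in (split or []):
--             counts[ex["source"]] += 1
--     return {source: counts.get(source, 0)
--             for source in ["ag_news", "bbc_news", "20newsgroups"]}
-- ===== Notes on version B (the rewrite author's own statement) =====
-- stated objective: simpler
-- what changed: Replaces A's nine filtered scans (three per fixed source name) by a single Counter accumulation pass over the concatenated splits followed by a fixed three-key extraction.
import Mathlib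
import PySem

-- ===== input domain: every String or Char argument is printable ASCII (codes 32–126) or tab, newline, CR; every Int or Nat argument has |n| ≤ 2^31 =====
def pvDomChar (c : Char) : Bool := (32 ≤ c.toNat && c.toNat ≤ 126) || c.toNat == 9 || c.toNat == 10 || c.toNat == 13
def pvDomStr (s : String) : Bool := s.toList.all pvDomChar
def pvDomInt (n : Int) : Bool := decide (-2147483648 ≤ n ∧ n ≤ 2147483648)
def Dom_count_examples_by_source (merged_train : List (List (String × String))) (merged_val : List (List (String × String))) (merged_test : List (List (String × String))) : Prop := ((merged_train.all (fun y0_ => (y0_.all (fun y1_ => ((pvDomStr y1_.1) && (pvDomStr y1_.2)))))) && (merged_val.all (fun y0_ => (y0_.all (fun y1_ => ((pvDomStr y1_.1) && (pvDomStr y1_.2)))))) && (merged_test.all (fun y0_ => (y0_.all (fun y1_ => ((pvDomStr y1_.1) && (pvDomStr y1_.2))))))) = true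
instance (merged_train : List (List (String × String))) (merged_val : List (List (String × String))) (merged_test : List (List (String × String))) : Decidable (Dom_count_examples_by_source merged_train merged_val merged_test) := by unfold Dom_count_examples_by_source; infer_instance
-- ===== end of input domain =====

-- ===== PORT A =====
-- B replaces A's nine filtered scans by one counting pass plus a fixed three-key extraction (objective: simpler).
-- ex["source"] is ported as first-match lookup compared to the expected source; inputs where the Python
-- raises KeyError (an example without a "source" key) are excluded by Pre_.
def count_examples_by_source (merged_train : List (List (String × String))) (merged_val : List (List (String × String))) (merged_test : List (List (String × String))) : List (String × Int) :=
  (["ag_news", "bbc_news", "20newsgroups"].foldl (fun (sources : PySem.Dict String Int) source =>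
    let train_count : Int := if merged_train.isEmpty then 0 else ((merged_train.filter (fun ex => (PySem.Dict.mk ex).get? "source" == some source)).length : Int)
    let val_count : Int := if merged_val.isEmpty then 0 else ((merged_val.filter (fun ex => (PySem.Dict.mk ex).get? "source" == some source)).length : Int)
    let test_count : Int := if merged_test.isEmpty then 0 else ((merged_test.filter (fun ex => (PySem.Dict.mk ex).get? "source" == some source)).length : Int)
    sources.insert source (train_count + val_count + test_count)) PySem.Dict.empty).items

-- ===== PORT B =====
def count_examples_by_source_alt (merged_train : List (List (String × String))) (merged_val : List (List (String × String))) (merged_test : List (List (String × String))) : List (String × Int) :=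
  let counts : PySem.Dict (Option String) Int :=
    PySem.Dict.counter ((merged_train ++ merged_val ++ merged_test).map (fun ex => (PySem.Dict.mk ex).get? "source"))
  ["ag_news", "bbc_news", "20newsgroups"].map (fun source => (source, counts.getD (some source) 0))

-- ===== PRECONDITION & SPEC =====
-- Pre_ excludes exactly the inputs on which the Python A raises KeyError: an example without a "source" key.
def Pre_count_examples_by_source (merged_train : List (List (String × String))) (merged_val : List (List (String × String))) (merged_test : List (List (String × String))) : Prop :=
  ((merged_train ++ merged_val ++ merged_test).all (fun ex => ex.any (fun p => p.1 == "source"))) = true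
instance (merged_train : List (List (String × String))) (merged_val : List (List (String × String))) (merged_test : List (List (String × String))) : Decidable (Pre_count_examples_by_source merged_train merged_val merged_test) := by unfold Pre_count_examples_by_source; infer_instance
def pvWitness_count_examples_by_source : (List (List (String × String))) × (List (List (String × String))) × (List (List (String × String))) :=
  ([[("source", "ag_news")], [("source", "bbc_news")]], [[("source", "ag_news")]], [])
def Spec_count_examples_by_source (merged_train : List (List (String × String))) (merged_val : List (List (String × String))) (merged_test : List (List (String × String))) (out : List (String × Int)) : Prop := out = count_examples_by_source_alt merged_train merged_val merged_test
instance (merged_train : List (List (String × String))) (merged_val : List (List (String × String))) (merged_test : List (List (String × String))) (out : List (String × Int)) : Decidable (Spec_count_examples_by_source merged_train merged_val merged_test out) := by unfold Spec_count_examples_by_source; infer_instance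

-- ===== CLAIM (what is proved, stated in full; the proofs are below) =====
def Claim_equal_count_examples_by_source : Prop := ∀ (merged_train : List (List (String × String))) (merged_val : List (List (String × String))) (merged_test : List (List (String × String))), Dom_count_examples_by_source merged_train merged_val merged_test → Pre_count_examples_by_source merged_train merged_val merged_test → Spec_count_examples_by_source merged_train merged_val merged_test (count_examples_by_source merged_train merged_val merged_test)

-- ===== LEMMAS AND PROOFS =====

-- B's counter lookup for source s equals the number of examples whose "source" lookup is s.
theorem pv_count_eq (xs : List (List (String × String))) (s : String) :
    (xs.map (fun ex => (PySem.Dict.mk ex).get? "source")).count (some s)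
      = (xs.filter (fun ex => (PySem.Dict.mk ex).get? "source" == some s)).length := by
  rw [List.count_eq_countP, List.countP_map, ← List.countP_eq_length_filter]
  rfl

theorem pv_main (merged_train merged_val merged_test : List (List (String × String))) :
    count_examples_by_source merged_train merged_val merged_test
      = count_examples_by_source_alt merged_train merged_val merged_test := by
  have hc : ∀ (s : String),
      (PySem.Dict.counter ((merged_train ++ merged_val ++ merged_test).map (fun ex => (PySem.Dict.mk ex).get? "source"))).getD (some s) 0
        = ((if merged_train.isEmpty then 0 else ((merged_train.filter (fun ex => (PySem.Dict.mk ex).get? "source" == some s)).length : Int))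
          + (if merged_val.isEmpty then 0 else ((merged_val.filter (fun ex => (PySem.Dict.mk ex).get? "source" == some s)).length : Int))
          + (if merged_test.isEmpty then 0 else ((merged_test.filter (fun ex => (PySem.Dict.mk ex).get? "source" == some s)).length : Int))) := by
    intro s
    rw [PySem.Dict.getD_counter]
    rw [List.map_append, List.map_append, List.count_append, List.count_append]
    rw [pv_count_eq, pv_count_eq, pv_count_eq]
    rcases merged_train with _ | _ <;> rcases merged_val with _ | _ <;> rcases merged_test with _ | _ <;>
      simp [List.isEmpty]
  unfold count_examples_by_source count_examples_by_source_alt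
  simp only [List.foldl, List.map]
  rw [hc "ag_news", hc "bbc_news", hc "20newsgroups"]
  rfl

-- ===== VERDICT (by name: the statement is the Claim_ definition above) =====
theorem count_examples_by_source_spec : Claim_equal_count_examples_by_source := by
  intro mt mv mx _ _
  unfold Spec_count_examples_by_source
  exact pv_main mt mv mx
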